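-- pv_equiv track=rewrite | github.com/Patxi91/CodeWars_Cloud | 6kyu-Simple Fun 23 Square Digits Sequence-Patxi.py | square_digits_sequence
-- ===== SOURCE A (Python) =====
-- def square_digits_sequence(n):
--     sequence = [n]  # Initialize the sequence with the first element
--     seen = set([n])  # Keep track of the elements that have already appeared
--
--     while True:
--         # Calculate the next element by summing the squared digits of the previous element
--         next_element = sum(int(digit) ** 2 for digit in str(sequence[-1]))
--
--         # If the next element is already in the sequence, return the length of the sequence
--         if next_element in seen:
--             return len(sequence) + 1  # Add 1 to account for the repeated element
--
--         # Add the next element to the sequence and mark it as seen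
--         sequence.append(next_element)
--         seen.add(next_element)
-- ===== SOURCE B (Python) =====
-- # Constant-space re-implementation: every squared-digit-sum trajectory ends in one of
-- # the map's two fixed points or in its known eight-value cycle, so instead of recording
-- # every value in a set we walk until the known terminal cycle set _CYCLE is hit
-- # (tail length t), then the answer is t + cycle_length + 1.
-- _CYCLE = {0, 1, 4, 16, 20, 37, 42, 58, 89, 145}
--
-- def square_digits_sequence(n):
--     def f(x):
--         s = 0
--         while x:
--             x, d = divmod(x, 10)
--             s += d * d
--         return s
--
--     t = 0
--     x = n
--     while x not in _CYCLE:
--         x = f(x)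
--         t += 1
--     lam = 1 if x in (0, 1) else 8
--     return t + lam + 1
-- ===== Notes on version B (the rewrite author's own statement) =====
-- stated objective: alternative
-- what changed: Instead of growing a seen-set of all iterates and string-converting each value, B walks the trajectory with arithmetic digit extraction until it hits the mathematically known terminal cycle set of the squared-digit-sum map (its two fixed points plus its eight-value cycle) and returns tail length + cycle length + 1, using constant memory and no strings; Pre_ excludes negative n, on which A raises ValueError.
import Mathlib
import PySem

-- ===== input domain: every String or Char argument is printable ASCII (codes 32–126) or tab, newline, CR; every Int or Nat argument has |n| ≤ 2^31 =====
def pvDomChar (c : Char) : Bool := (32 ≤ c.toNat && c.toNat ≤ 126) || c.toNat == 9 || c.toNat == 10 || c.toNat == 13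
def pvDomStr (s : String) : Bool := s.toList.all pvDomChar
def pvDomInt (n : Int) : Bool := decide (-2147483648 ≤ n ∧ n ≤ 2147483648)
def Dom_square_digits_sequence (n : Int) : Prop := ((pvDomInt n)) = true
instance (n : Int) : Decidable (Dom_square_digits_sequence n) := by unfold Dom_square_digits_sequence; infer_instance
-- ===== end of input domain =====

-- B replaces A's seen-set loop by a constant-space walk to the known terminal cycle set of
-- the squared-digit-sum map, with arithmetic digit extraction (objective: alternative).


-- ===== PORT A =====
-- sum(int(digit) ** 2 for digit in str(x)); int('-') raises ValueError — excluded by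
-- Pre_ (0 ≤ n), so the '.getD 0' only totalizes the port.
def pvSqDigitsA (x : Int) : Int :=
  ((PySem.Int.toChars x).map (fun c => ((PySem.Int.ofChars? [c]).getD 0) ^ 2)).sum

-- the 'while True' loop; the fuel only totalizes it (40 is proved sufficient on Dom ∧ Pre_)
def pvLoopA : Nat → List Int → PySem.Set Int → Int
  | 0, _, _ => 0
  | fuel+1, sequence, seen =>
    let next := pvSqDigitsA (PySem.List.pyGetD sequence (-1) 0)  -- sequence[-1]; never empty
    if PySem.Set.contains seen next then PySem.List.len sequence + 1
    else pvLoopA fuel (sequence ++ [next]) (PySem.Set.add seen next)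

def square_digits_sequence (n : Int) : Int :=
  pvLoopA 40 [n] (PySem.Set.ofList [n])

-- ===== PORT B =====
def pvCYCLE : PySem.Set Int := PySem.Set.ofList [0, 1, 4, 16, 20, 37, 42, 58, 89, 145]

-- s = 0; while x: x, d = divmod(x, 10); s += d*d   (fuel totalizes: 64 digit steps suffice on Dom;
-- divmod's divisor is the constant 10 ≠ 0, so divmod? is never none and '.getD (0,0)' only totalizes)
def pvFB : Nat → Int → Int → Int
  | 0, _, s => s
  | fuel+1, x, s =>
    if x ≠ 0 then
      let p := (PySem.Int.divmod? x 10).getD (0, 0)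
      pvFB fuel p.1 (s + p.2 * p.2)
    else s

-- t = 0; x = n; while x not in _CYCLE: x = f(x); t += 1   (fuel totalizes; sufficient on Dom ∧ Pre_)
def pvLoopB : Nat → Int → Int → Int
  | 0, _, t => t
  | fuel+1, x, t =>
    if ¬ PySem.Set.contains pvCYCLE x then pvLoopB fuel (pvFB 64 x 0) (t + 1)
    else
      let lam : Int := if x = 0 ∨ x = 1 then 1 else 8
      t + lam + 1

def square_digits_sequence_alt (n : Int) : Int :=
  pvLoopB 40 n 0

-- ===== PRECONDITION & SPEC =====
-- Pre_ excludes exactly the negative n, on which Python A raises ValueError (int('-') on the sign of str(n)).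
def Pre_square_digits_sequence (n : Int) : Prop := 0 ≤ n
instance (n : Int) : Decidable (Pre_square_digits_sequence n) := by unfold Pre_square_digits_sequence; infer_instance
def pvWitness_square_digits_sequence : Int := (7)

def Spec_square_digits_sequence (n : Int) (out : Int) : Prop := out = square_digits_sequence_alt n
instance (n : Int) (out : Int) : Decidable (Spec_square_digits_sequence n out) := by unfold Spec_square_digits_sequence; infer_instance

-- ===== CLAIM (what is proved, stated in full; the proofs are below) =====
def Claim_equal_square_digits_sequence : Prop := ∀ (n : Int), Dom_square_digits_sequence n → Pre_square_digits_sequence n → Spec_square_digits_sequence n (square_digits_sequence n)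

-- ===== LEMMAS AND PROOFS =====

-- Mathematical model: arithmetic squared-digit sum on Nat, its iterates, and the cycle set.
def pvSsdF : Nat → Nat → Nat
  | 0, _ => 0
  | fu+1, m => if m = 0 then 0 else pvSsdF fu (m/10) + (m % 10)^2

def pvSsd (m : Nat) : Nat := pvSsdF m m

theorem pvSsdF_irrel : ∀ (fu fu' m : Nat), m ≤ fu → m ≤ fu' → pvSsdF fu m = pvSsdF fu' m := by
  intro fu
  induction fu with
  | zero =>
    intro fu' m h _
    interval_cases m
    cases fu' <;> simp [pvSsdF]
  | succ fu ih =>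
    intro fu' m h h'
    cases fu' with
    | zero =>
      interval_cases m
      simp [pvSsdF]
    | succ fu' =>
      by_cases hm : m = 0
      · simp [pvSsdF, hm]
      · have hlt : m / 10 < m := Nat.div_lt_self (Nat.pos_of_ne_zero hm) (by omega)
        have hd : m / 10 ≤ fu := by omega
        have hd' : m / 10 ≤ fu' := by omega
        simp only [pvSsdF, if_neg hm]
        rw [ih fu' (m/10) hd hd']

def pvIter (k m : Nat) : Nat := pvSsd^[k] m

def pvC : List Nat := [0, 1, 4, 16, 20, 37, 42, 58, 89, 145]

theorem pvSsd_pos (m : Nat) (h : 0 < m) : pvSsd m = pvSsd (m/10) + (m % 10)^2 := by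
  have hm : m ≠ 0 := by omega
  obtain ⟨k, rfl⟩ : ∃ k, m = k + 1 := ⟨m - 1, by omega⟩
  show pvSsdF (k+1) (k+1) = pvSsd ((k+1)/10) + ((k+1) % 10)^2
  simp only [pvSsdF, if_neg hm]
  congr 1
  exact pvSsdF_irrel k ((k+1)/10) ((k+1)/10)
    (by have hlt : (k+1) / 10 < k + 1 := Nat.div_lt_self (Nat.succ_pos k) (by omega); omega) le_rfl

theorem pvC_closed : ∀ x ∈ pvC, pvSsd x ∈ pvC := by decide

set_option maxRecDepth 100000 in
theorem pvReach15 : ∀ m < 811, pvIter 15 m ∈ pvC := by decide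

theorem pvSsd_le : ∀ (k m : Nat), m < 10^k → pvSsd m ≤ 81 * k := by
  intro k
  induction k with
  | zero =>
    intro m h
    interval_cases m
    simp [pvSsd, pvSsdF]
  | succ k ih =>
    intro m h
    by_cases hm : m = 0
    · subst hm; simp [pvSsd, pvSsdF]
    · rw [pvSsd_pos m (Nat.pos_of_ne_zero hm)]
      have hp : (10:Nat)^(k+1) = 10^k * 10 := pow_succ 10 k
      have h1 : m / 10 < 10^k := Nat.div_lt_of_lt_mul (by omega)
      have h2 := ih (m/10) h1
      have h3 : m % 10 ≤ 9 := by omega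
      have h4 : (m % 10)^2 ≤ 81 := by
        calc (m % 10)^2 ≤ 9^2 := Nat.pow_le_pow_left h3 2
        _ = 81 := by norm_num
      omega

theorem pvReach16 (m : Nat) (hm : m ≤ 2^31) : pvIter 16 m ∈ pvC := by
  have h10 : (10:Nat)^10 = 10000000000 := by norm_num
  have h1 : pvSsd m ≤ 810 := by
    have := pvSsd_le 10 m (by omega)
    omega
  have h2 : pvIter 16 m = pvIter 15 (pvSsd m) := by
    show pvSsd^[16] m = pvSsd^[15] (pvSsd m)
    rw [show (16:Nat) = 15 + 1 from rfl, Function.iterate_succ_apply]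
  rw [h2]
  exact pvReach15 _ (by omega)

-- the generator body 'int(digit) ** 2' of port A, as a function of the character
def pvG : Char → Int := fun c => ((PySem.Int.ofChars? [c]).getD 0) ^ 2

theorem pvG_digitChar : ∀ d, d < 10 → pvG (Nat.digitChar d) = ((d^2 : Nat) : Int) := by decide

theorem pvSsd_lt10 : ∀ d, d < 10 → pvSsd d = d^2 := by decide

theorem pvDigitsSum : ∀ m : Nat, ((Nat.toDigits 10 m).map pvG).sum = ((pvSsd m : Nat) : Int) := by
  intro m
  induction m using Nat.strong_induction_on with
  | _ m ih =>
    by_cases h : m < 10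
    · rw [Nat.toDigits_of_lt_base h]
      simp [pvG_digitChar m h, pvSsd_lt10 m h]
    · rw [Nat.toDigits_of_base_le (by norm_num) (by omega)]
      rw [List.map_append, List.sum_append]
      have h1 : m / 10 < m := Nat.div_lt_self (by omega) (by omega)
      rw [ih (m/10) h1]
      simp only [List.map_cons, List.map_nil, List.sum_cons, List.sum_nil]
      rw [pvG_digitChar (m % 10) (by omega), pvSsd_pos m (by omega)]
      push_cast
      ring

theorem pvSqDigitsA_natCast (m : Nat) : pvSqDigitsA (m : Int) = ((pvSsd m : Nat) : Int) := by
  have ht : PySem.Int.toChars (m : Int) = Nat.toDigits 10 m := by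
    simp [PySem.Int.toChars]
  show ((PySem.Int.toChars (m : Int)).map pvG).sum = _
  rw [ht]
  exact pvDigitsSum m

theorem pvFB_natCast : ∀ (fu : Nat) (m : Nat) (s : Int), m < 10^fu →
    pvFB fu (m : Int) s = s + ((pvSsd m : Nat) : Int) := by
  intro fu
  induction fu with
  | zero =>
    intro m s h
    interval_cases m
    simp [pvFB, pvSsd, pvSsdF]
  | succ fu ih =>
    intro m s h
    by_cases hm : m = 0
    · subst hm; simp [pvFB, pvSsd, pvSsdF]
    · have hmi : ((m : Int)) ≠ 0 := by exact_mod_cast hm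
      have hq : ((m : Int)).fdiv 10 = ((m / 10 : Nat) : Int) := by
        rw [show ((10:Int)) = ((10:Nat):Int) from rfl, Int.ofNat_fdiv]
      have hr : ((m : Int)).fmod 10 = ((m % 10 : Nat) : Int) := by
        rw [show ((10:Int)) = ((10:Nat):Int) from rfl]
        exact PySem.Int.mod_natCast m 10
      simp only [pvFB, if_pos hmi, PySem.Int.divmod?, if_neg (by norm_num : ((10:Int)) ≠ 0),
        Option.getD_some, hq, hr]
      have hp : (10:Nat)^(fu+1) = 10^fu * 10 := pow_succ 10 fu
      rw [ih (m/10) _ (Nat.div_lt_of_lt_mul (by omega))]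
      rw [pvSsd_pos m (Nat.pos_of_ne_zero hm)]
      push_cast
      ring

theorem pvCYCLE_mem (v : Nat) : PySem.Set.contains pvCYCLE (v : Int) = true ↔ v ∈ pvC := by
  simp only [pvCYCLE, PySem.Set.contains, List.contains_iff_mem, PySem.Set.mem_ofList, pvC,
    List.mem_cons, List.not_mem_nil, or_false]
  omega

theorem pvCyc_ret : ∀ x ∈ pvC, ¬(x = 0 ∨ x = 1) → pvIter 8 x = x := by decide
theorem pvCyc_fix : ∀ x ∈ pvC, (x = 0 ∨ x = 1) → pvSsd x = x := by decide
theorem pvCyc_distinct : ∀ x ∈ pvC, ¬(x = 0 ∨ x = 1) →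
    ∀ a, a < 8 → ∀ b, b < 8 → a < b → pvIter a x ≠ pvIter b x := by decide

theorem pvIter_succ (k m : Nat) : pvIter (k+1) m = pvSsd (pvIter k m) :=
  Function.iterate_succ_apply' pvSsd k m

theorem pvIter_add (a b m : Nat) : pvIter (a + b) m = pvIter a (pvIter b m) :=
  Function.iterate_add_apply pvSsd a b m

theorem pvIter_le (m : Nat) (hm : m ≤ 2^31) : ∀ t, pvIter t m ≤ 2^31 := by
  intro t
  induction t with
  | zero => simpa [pvIter] using hm
  | succ t ih =>
    rw [pvIter_succ]
    have h10 : (10:Nat)^10 = 10000000000 := by norm_num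
    have := pvSsd_le 10 (pvIter t m) (by omega)
    omega

theorem pvIterC (m mu : Nat) (hmuC : pvIter mu m ∈ pvC) : ∀ d, pvIter (mu + d) m ∈ pvC := by
  intro d
  induction d with
  | zero => simpa using hmuC
  | succ d ih =>
    rw [show mu + (d+1) = (mu+d) + 1 by omega, pvIter_succ]
    exact pvC_closed _ ih

theorem pvPeriodic (m i j : Nat) (hij : i < j) (he : pvIter i m = pvIter j m) :
    ∀ t, i ≤ t → ∃ s, i ≤ s ∧ s < j ∧ pvIter t m = pvIter s m := by
  intro t
  induction t using Nat.strong_induction_on with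
  | _ t ih =>
    intro hit
    by_cases hlt : t < j
    · exact ⟨t, hit, hlt, rfl⟩
    · have h1 : pvIter t m = pvIter (t - j + i) m := by
        calc pvIter t m = pvIter ((t-j) + j) m := by rw [show (t-j) + j = t by omega]
        _ = pvIter (t-j) (pvIter j m) := pvIter_add _ _ _
        _ = pvIter (t-j) (pvIter i m) := by rw [← he]
        _ = pvIter (t - j + i) m := (pvIter_add _ _ _).symm
      obtain ⟨s, hs1, hs2, hs3⟩ := ih (t - j + i) (by omega) (by omega)
      exact ⟨s, hs1, hs2, by rw [h1, hs3]⟩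

theorem pvDistinct (m mu lam : Nat)
    (hmuC : pvIter mu m ∈ pvC) (hmumin : ∀ s, s < mu → pvIter s m ∉ pvC)
    (hlam : lam = if (pvIter mu m = 0 ∨ pvIter mu m = 1) then 1 else 8) :
    ∀ i j, i < j → j < mu + lam → pvIter i m ≠ pvIter j m := by
  intro i j hij hj he
  by_cases hjmu : j < mu
  · obtain ⟨s, hs1, hs2, hs3⟩ := pvPeriodic m i j hij he mu (by omega)
    exact hmumin s (by omega) (hs3 ▸ hmuC)
  · by_cases himu : i < mu
    · have hjC : pvIter j m ∈ pvC := by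
        have := pvIterC m mu hmuC (j - mu)
        rwa [show mu + (j - mu) = j by omega] at this
      exact hmumin i himu (he ▸ hjC)
    · by_cases hx : pvIter mu m = 0 ∨ pvIter mu m = 1
      · rw [if_pos hx] at hlam; omega
      · rw [if_neg hx] at hlam
        have hi : pvIter i m = pvIter (i - mu) (pvIter mu m) := by
          rw [← pvIter_add]; congr 1; omega
        have hjj : pvIter j m = pvIter (j - mu) (pvIter mu m) := by
          rw [← pvIter_add]; congr 1; omega
        have hd := pvCyc_distinct (pvIter mu m) hmuC hx (i - mu) (by omega) (j - mu) (by omega) (by omega)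
        rw [hi, hjj] at he
        exact hd he

theorem pvRepeat (m mu lam : Nat) (hmuC : pvIter mu m ∈ pvC)
    (hlam : lam = if (pvIter mu m = 0 ∨ pvIter mu m = 1) then 1 else 8) :
    pvIter (mu + lam) m = pvIter mu m := by
  have h : pvIter (mu + lam) m = pvIter lam (pvIter mu m) := by
    rw [← pvIter_add]; congr 1; omega
  rw [h]
  by_cases hx : pvIter mu m = 0 ∨ pvIter mu m = 1
  · rw [if_pos hx] at hlam; subst hlam
    show pvSsd^[1] (pvIter mu m) = pvIter mu m
    rw [Function.iterate_one]
    exact pvCyc_fix _ hmuC hx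
  · rw [if_neg hx] at hlam; subst hlam
    exact pvCyc_ret _ hmuC hx

theorem pvOfList_append_singleton (l : List Int) (x : Int) :
    PySem.Set.ofList (l ++ [x]) = PySem.Set.add (PySem.Set.ofList l) x := by
  simp [PySem.Set.ofList_eq_foldl, List.foldl_append]

theorem pvRangeSplit (F : Nat → Int) (k : Nat) :
    (List.range (k+1)).map F = (List.range k).map F ++ [F k] := by
  rw [List.range_succ, List.map_append]
  rfl

theorem pvLoopA_eq (m mu lam : Nat)
    (hmuC : pvIter mu m ∈ pvC) (hmumin : ∀ s, s < mu → pvIter s m ∉ pvC)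
    (hlam : lam = if (pvIter mu m = 0 ∨ pvIter mu m = 1) then 1 else 8) :
    ∀ fuel k, k < mu + lam → mu + lam ≤ k + fuel →
    pvLoopA fuel ((List.range (k+1)).map (fun t => ((pvIter t m : Nat) : Int)))
      (PySem.Set.ofList ((List.range (k+1)).map (fun t => ((pvIter t m : Nat) : Int))))
      = ((mu + lam + 1 : Nat) : Int) := by
  have hlam1 : 1 ≤ lam := by rw [hlam]; split <;> omega
  intro fuel
  induction fuel with
  | zero => intro k h1 h2; omega
  | succ fuel ih =>
    intro k h1 h2
    simp only [pvLoopA]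
    rw [pvRangeSplit (fun t => ((pvIter t m : Nat) : Int)) k,
      PySem.List.pyGetD_neg_one_append_singleton,
      ← pvRangeSplit (fun t => ((pvIter t m : Nat) : Int)) k]
    have hnext : pvSqDigitsA ((pvIter k m : Nat) : Int) = ((pvIter (k+1) m : Nat) : Int) := by
      rw [pvSqDigitsA_natCast, ← pvIter_succ]
    rw [hnext]
    have hmem : (((pvIter (k+1) m : Nat) : Int) ∈
        (List.range (k+1)).map (fun t => ((pvIter t m : Nat) : Int))) ↔
        ∃ t, t < k+1 ∧ pvIter t m = pvIter (k+1) m := by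
      simp only [List.mem_map, List.mem_range]
      constructor
      · rintro ⟨t, ht, hv⟩; exact ⟨t, ht, by exact_mod_cast hv⟩
      · rintro ⟨t, ht, hv⟩; exact ⟨t, ht, by exact_mod_cast hv⟩
    by_cases hcase : k + 1 = mu + lam
    · have hc : PySem.Set.contains
          (PySem.Set.ofList ((List.range (k+1)).map (fun t => ((pvIter t m : Nat) : Int))))
          ((pvIter (k+1) m : Nat) : Int) = true := by
        simp only [PySem.Set.contains, List.contains_iff_mem, PySem.Set.mem_ofList]
        refine hmem.mpr ⟨mu, by omega, ?_⟩
        rw [hcase]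
        exact (pvRepeat m mu lam hmuC hlam).symm
      rw [if_pos hc]
      simp only [PySem.List.len_eq, List.length_map, List.length_range]
      push_cast
      omega
    · have hc : ¬ (PySem.Set.contains
          (PySem.Set.ofList ((List.range (k+1)).map (fun t => ((pvIter t m : Nat) : Int))))
          ((pvIter (k+1) m : Nat) : Int) = true) := by
        simp only [PySem.Set.contains, List.contains_iff_mem, PySem.Set.mem_ofList]
        intro hmm
        obtain ⟨t, ht, hv⟩ := hmem.mp hmm
        exact pvDistinct m mu lam hmuC hmumin hlam t (k+1) ht (by omega) hv
      rw [if_neg hc]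
      rw [← pvRangeSplit (fun t => ((pvIter t m : Nat) : Int)) (k+1),
        ← pvOfList_append_singleton, ← pvRangeSplit (fun t => ((pvIter t m : Nat) : Int)) (k+1)]
      exact ih (k+1) (by omega) (by omega)

theorem pvLoopB_eq (m mu lam : Nat) (hm : m ≤ 2^31)
    (hmuC : pvIter mu m ∈ pvC) (hmumin : ∀ s, s < mu → pvIter s m ∉ pvC)
    (hlam : lam = if (pvIter mu m = 0 ∨ pvIter mu m = 1) then 1 else 8) :
    ∀ fuel k, k ≤ mu → mu < k + fuel →
    pvLoopB fuel ((pvIter k m : Nat) : Int) ((k : Nat) : Int) = ((mu + lam + 1 : Nat) : Int) := by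
  intro fuel
  induction fuel with
  | zero => intro k h1 h2; omega
  | succ fuel ih =>
    intro k h1 h2
    simp only [pvLoopB]
    by_cases hk : k = mu
    · subst hk
      have hc : PySem.Set.contains pvCYCLE ((pvIter k m : Nat) : Int) = true :=
        (pvCYCLE_mem _).mpr hmuC
      rw [if_neg (not_not_intro hc)]
      have hcast : ((((pvIter k m : Nat) : Int) = 0 ∨ ((pvIter k m : Nat) : Int) = 1)
          ↔ (pvIter k m = 0 ∨ pvIter k m = 1)) := by
        constructor <;> intro h <;> rcases h with h|h
        · left; exact_mod_cast h
        · right; exact_mod_cast h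
        · left; exact_mod_cast h
        · right; exact_mod_cast h
      by_cases hx : pvIter k m = 0 ∨ pvIter k m = 1
      · rw [if_pos (hcast.mpr hx)]
        rw [if_pos hx] at hlam
        push_cast
        omega
      · rw [if_neg (fun hh => hx (hcast.mp hh))]
        rw [if_neg hx] at hlam
        push_cast
        omega
    · have hkm : k < mu := by omega
      have hc : ¬ (PySem.Set.contains pvCYCLE ((pvIter k m : Nat) : Int) = true) := by
        intro hh
        exact hmumin k hkm ((pvCYCLE_mem _).mp hh)
      rw [if_pos hc]
      have h10 : (2:Nat)^31 < 10^64 := by norm_num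
      have hb : pvIter k m < 10^64 := by
        have := pvIter_le m hm k
        omega
      rw [pvFB_natCast 64 (pvIter k m) 0 hb, zero_add, ← pvIter_succ]
      rw [show (((k : Nat) : Int) + 1) = (((k+1 : Nat)) : Int) by push_cast; ring]
      exact ih (k+1) (by omega) (by omega)

-- ===== VERDICT (by name: the statement is the Claim_ definition above) =====
theorem square_digits_sequence_spec : Claim_equal_square_digits_sequence := by
  unfold Claim_equal_square_digits_sequence
  intro n hdom hpre
  unfold Spec_square_digits_sequence
  unfold Pre_square_digits_sequence at hpre
  unfold Dom_square_digits_sequence pvDomInt at hdom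
  rw [decide_eq_true_iff] at hdom
  have hn : ((n.toNat : Nat) : Int) = n := Int.toNat_of_nonneg hpre
  set m := n.toNat with hmdef
  have hm31 : m ≤ 2^31 := by omega
  have hEx : ∃ t, pvIter t m ∈ pvC := ⟨16, pvReach16 m hm31⟩
  have hmuC : pvIter (Nat.find hEx) m ∈ pvC := Nat.find_spec hEx
  have hmumin : ∀ s, s < Nat.find hEx → pvIter s m ∉ pvC := fun s hs => Nat.find_min hEx hs
  have hmu16 : Nat.find hEx ≤ 16 := Nat.find_le (pvReach16 m hm31)
  set mu := Nat.find hEx with hmudef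
  set lam := if (pvIter mu m = 0 ∨ pvIter mu m = 1) then 1 else 8 with hlamdef
  have hlam18 : lam = 1 ∨ lam = 8 := by rw [hlamdef]; split <;> simp
  have hA : square_digits_sequence n = ((mu + lam + 1 : Nat) : Int) := by
    unfold square_digits_sequence
    have h0 : [n] = (List.range 1).map (fun t => ((pvIter t m : Nat) : Int)) := by
      simp [pvIter, hn]
    rw [h0]
    exact pvLoopA_eq m mu lam hmuC hmumin hlamdef 40 0 (by omega) (by omega)
  have hB : square_digits_sequence_alt n = ((mu + lam + 1 : Nat) : Int) := by
    unfold square_digits_sequence_alt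
    have h0 : pvLoopB 40 n 0 = pvLoopB 40 ((pvIter 0 m : Nat) : Int) ((0 : Nat) : Int) := by
      simp [pvIter, hn]
    rw [h0]
    exact pvLoopB_eq m mu lam hm31 hmuC hmumin hlamdef 40 0 (by omega) (by omega)
  rw [hA, hB]
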